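-- pv_equiv track=rewrite | github.com/OxfordIonTrapGroup/ndscan | ndscan/experiment/scan_generator.py | _bisection_points
-- ===== SOURCE A (Python) =====
-- def _bisection_points(lower: int, upper: int, depth: int):
--     """Yield, in left-to-right order, the integer midpoints at the given depth of
--     the bisection tree of the open interval ``(lower, upper)``.
--
--     Depth 0 is the root midpoint ``(lower + upper) // 2``; depth ``k`` recurses
--     into the left and right halves at depth ``k - 1``. Once an interval has no
--     interior integers (``upper - lower < 2``), recursion stops — each integer in
--     ``[lower, upper]`` is therefore visited at most once across all depths.
--     """
--     if upper - lower < 2: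
--         return
--     mid = (lower + upper) // 2
--     if depth == 0:
--         yield mid
--         return
--     yield from _bisection_points(lower, mid, depth - 1)
--     yield from _bisection_points(mid, upper, depth - 1)
-- ===== SOURCE B (Python) =====
-- def _bisection_points(lower: int, upper: int, depth: int):
--     """Iterative level-by-level (BFS) version: march a frontier of intervals
--     down to the target depth, then yield the midpoints of that single level."""
--     if depth < 0:
--         return
--     frontier = [(lower, upper)]
--     for _ in range(depth):
--         if not frontier:
--             break
--         frontier = [half
--                     for lo, hi in frontier if hi - lo >= 2
--                     for half in ((lo, (lo + hi) // 2), ((lo + hi) // 2, hi))]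
--     for lo, hi in frontier:
--         if hi - lo >= 2:
--             yield (lo + hi) // 2
-- ===== Notes on version B (the rewrite author's own statement) =====
-- stated objective: alternative
-- what changed: Replaced the depth-first recursive generator with an iterative level-by-level BFS: a frontier of intervals is split depth times, then the midpoints of the surviving intervals at that single level are yielded left to right.
import Mathlib
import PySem

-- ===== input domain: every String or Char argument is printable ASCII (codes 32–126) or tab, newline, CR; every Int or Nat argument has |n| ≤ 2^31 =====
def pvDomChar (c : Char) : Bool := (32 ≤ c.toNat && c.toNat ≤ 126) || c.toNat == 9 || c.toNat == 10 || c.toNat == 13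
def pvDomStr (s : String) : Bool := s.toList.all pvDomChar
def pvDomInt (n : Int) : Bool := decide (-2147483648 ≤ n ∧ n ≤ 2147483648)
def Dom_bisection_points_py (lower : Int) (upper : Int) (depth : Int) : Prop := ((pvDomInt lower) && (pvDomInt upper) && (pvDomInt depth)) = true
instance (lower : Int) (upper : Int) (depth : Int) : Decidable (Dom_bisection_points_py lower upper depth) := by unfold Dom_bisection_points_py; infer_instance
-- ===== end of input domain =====

-- B replaces A's depth-first recursion by an iterative level-by-level (BFS) frontier sweep; objective: alternative decomposition, same cost.


-- ===== PORT A =====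
-- literal transliteration of A's recursive generator (the yields collected into a list)
def bisection_points_py (lower : Int) (upper : Int) (depth : Int) : List Int :=
  if upper - lower < 2 then []
  else
    let mid := PySem.Int.floordiv (lower + upper) 2
    if depth == 0 then [mid]
    else
      bisection_points_py lower mid (depth - 1) ++ bisection_points_py mid upper (depth - 1)
termination_by (upper - lower).toNat
decreasing_by
  · have h := PySem.Int.floordiv_two_mid_bounds (lo := lower) (hi := upper) (by omega)
    have h2 : PySem.Int.floordiv (lower + upper) 2 = (lower + upper) / 2 :=
      PySem.Int.floordiv_eq_ediv_of_pos (by omega)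
    omega
  · have h := PySem.Int.floordiv_two_mid_bounds (lo := lower) (hi := upper) (by omega)
    have h2 : PySem.Int.floordiv (lower + upper) 2 = (lower + upper) / 2 :=
      PySem.Int.floordiv_eq_ediv_of_pos (by omega)
    omega

-- ===== PORT B =====
-- one BFS level: the comprehension '[half for lo, hi in frontier if hi - lo >= 2 for half in (...)]'
def bpStep (f : List (Int × Int)) : List (Int × Int) :=
  f.flatMap (fun p =>
    if 2 ≤ p.2 - p.1 then
      [(p.1, PySem.Int.floordiv (p.1 + p.2) 2), (PySem.Int.floordiv (p.1 + p.2) 2, p.2)]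
    else [])

-- the 'for _ in range(depth)' loop with its early 'if not frontier: break' (depth ≥ 0 at the call site)
def bpLoop (f : List (Int × Int)) : Nat → List (Int × Int)
  | 0 => f
  | n + 1 => if f = [] then f else bpLoop (bpStep f) n

def bisection_points_py_alt (lower : Int) (upper : Int) (depth : Int) : List Int :=
  if depth < 0 then []
  else
    (bpLoop [(lower, upper)] depth.toNat).flatMap (fun p =>
      if 2 ≤ p.2 - p.1 then [PySem.Int.floordiv (p.1 + p.2) 2] else [])

-- ===== PRECONDITION & SPEC =====
def Spec_bisection_points_py (lower : Int) (upper : Int) (depth : Int) (out : List Int) : Prop := out = bisection_points_py_alt lower upper depth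
instance (lower : Int) (upper : Int) (depth : Int) (out : List Int) : Decidable (Spec_bisection_points_py lower upper depth out) := by unfold Spec_bisection_points_py; infer_instance

-- ===== CLAIM (what is proved, stated in full; the proofs are below) =====
def Claim_equal_bisection_points_py : Prop := ∀ (lower : Int) (upper : Int) (depth : Int), Dom_bisection_points_py lower upper depth → Spec_bisection_points_py lower upper depth (bisection_points_py lower upper depth)

-- ===== LEMMAS AND PROOFS =====

-- A yields nothing at negative depth (the recursion exhausts the interval)
theorem bp_neg (lower upper depth : Int) (hd : depth < 0) :
    bisection_points_py lower upper depth = [] := by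
  rw [bisection_points_py]
  split
  · rfl
  · have hz : (depth == 0) = false := by simp; omega
    rw [hz]
    simp only [Bool.false_eq_true, if_false]
    rw [bp_neg lower _ (depth - 1) (by omega), bp_neg _ upper (depth - 1) (by omega)]
    rfl
termination_by (upper - lower).toNat
decreasing_by
  · have h := PySem.Int.floordiv_two_mid_bounds (lo := lower) (hi := upper) (by omega)
    have h2 : PySem.Int.floordiv (lower + upper) 2 = (lower + upper) / 2 :=
      PySem.Int.floordiv_eq_ediv_of_pos (by omega)
    omega
  · have h := PySem.Int.floordiv_two_mid_bounds (lo := lower) (hi := upper) (by omega)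
    have h2 : PySem.Int.floordiv (lower + upper) 2 = (lower + upper) / 2 :=
      PySem.Int.floordiv_eq_ediv_of_pos (by omega)
    omega

-- depth 0: A is exactly B's final harvesting pass, pointwise
theorem bp_zero (p : Int × Int) :
    bisection_points_py p.1 p.2 0 =
      (if 2 ≤ p.2 - p.1 then [PySem.Int.floordiv (p.1 + p.2) 2] else []) := by
  rw [bisection_points_py]
  by_cases h : p.2 - p.1 < 2
  · rw [if_pos h, if_neg (show ¬((2:Int) ≤ p.2 - p.1) by omega)]
  · rw [if_neg h, if_pos (show (2:Int) ≤ p.2 - p.1 by omega)]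
    rfl

-- one BFS step commutes with one level of A's recursion, pointwise over the frontier
theorem bp_step_lemma (f : List (Int × Int)) (d : Int) (hd : 0 ≤ d) :
    f.flatMap (fun p => bisection_points_py p.1 p.2 (d + 1)) =
      (bpStep f).flatMap (fun p => bisection_points_py p.1 p.2 d) := by
  unfold bpStep
  rw [List.flatMap_assoc]
  congr 1
  funext p
  by_cases h : 2 ≤ p.2 - p.1
  · rw [if_pos h]
    rw [bisection_points_py]
    rw [if_neg (by omega)]
    have hz : (d + 1 == 0) = false := by simp; omega
    rw [hz]
    simp [List.flatMap]
  · rw [if_neg h]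
    rw [bisection_points_py, if_pos (by omega)]
    rfl

-- the BFS invariant: harvesting after n steps equals A at depth n over the frontier
theorem bp_main (n : Nat) (f : List (Int × Int)) :
    (bpLoop f n).flatMap (fun p =>
        if 2 ≤ p.2 - p.1 then [PySem.Int.floordiv (p.1 + p.2) 2] else []) =
      f.flatMap (fun p => bisection_points_py p.1 p.2 (n : Int)) := by
  induction n generalizing f with
  | zero =>
    simp only [bpLoop]
    congr 1
    funext p
    exact (bp_zero p).symm
  | succ n ih =>
    have := bp_step_lemma f (n : Int) (by positivity)
    simp only [bpLoop]
    by_cases hf : f = []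
    · rw [if_pos hf, hf]; rfl
    rw [if_neg hf, ih (bpStep f)]
    rw [← this]
    norm_cast

-- ===== VERDICT (by name: the statement is the Claim_ definition above) =====
theorem bisection_points_py_spec : Claim_equal_bisection_points_py := by
  intro lower upper depth _
  unfold Spec_bisection_points_py bisection_points_py_alt
  by_cases hd : depth < 0
  · rw [if_pos hd, bp_neg lower upper depth hd]
  · rw [if_neg hd, bp_main depth.toNat [(lower, upper)]]
    have : ((depth.toNat : Int)) = depth := by omega
    simp [this]
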